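-- pv_equiv track=rewrite | github.com/edgeboyo/dns-deployment | tools/typoGenerator.py | selectNonPeriods
-- ===== SOURCE A (Python) =====
-- def selectNonPeriods(url):
--     valid = []
--
--     validSection = []
--     for i, c in enumerate(url):
--         if c != '.':
--             validSection.append(i)
--         else:
--             valid = valid + validSection
--             validSection = []
--
--     return valid
-- ===== SOURCE B (Python) =====
-- def selectNonPeriods(url):
--     last = url.rfind('.')
--     return [i for i in range(last) if url[i] != '.']
-- ===== Notes on version B (the rewrite author's own statement) =====
-- stated objective: faster
-- what changed: Instead of accumulating per-section index lists and re-concatenating them at every '.', B locates the last '.' with rfind and returns the non-'.' indices below it in one comprehension.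
import Mathlib
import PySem

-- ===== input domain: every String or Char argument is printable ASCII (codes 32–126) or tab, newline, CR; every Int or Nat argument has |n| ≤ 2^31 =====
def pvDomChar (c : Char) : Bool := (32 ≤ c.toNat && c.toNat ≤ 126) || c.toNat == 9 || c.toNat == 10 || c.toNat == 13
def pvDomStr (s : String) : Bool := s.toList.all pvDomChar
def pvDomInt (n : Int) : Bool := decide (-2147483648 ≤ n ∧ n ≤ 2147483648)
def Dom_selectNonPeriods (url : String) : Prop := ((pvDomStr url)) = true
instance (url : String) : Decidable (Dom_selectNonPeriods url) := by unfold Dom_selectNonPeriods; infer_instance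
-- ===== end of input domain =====

-- B replaces A's quadratic section-list re-concatenation by a single rfind pass plus one comprehension.


-- ===== PORT A =====
def selectNonPeriods (url : String) : List Int :=
  let r := (PySem.List.enumerate url.toList 0).foldl
    (fun (s : List Int × List Int) (ic : Int × Char) =>
      if ic.2 ≠ '.' then (s.1, s.2 ++ [ic.1]) else (s.1 ++ s.2, ([] : List Int)))
    ([], [])
  r.1

-- ===== PORT B =====
-- url.rfind('.') ported by hand (exact for a single-character needle): last index of '.', -1 if absent
def selectNonPeriods_alt (url : String) : List Int :=
  let last := (PySem.List.enumerate url.toList 0).foldl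
    (fun (acc : Int) (ic : Int × Char) => if ic.2 = '.' then ic.1 else acc) (-1)
  (PySem.List.pyRange 0 last 1).filter
    (fun i => decide (PySem.List.pyGetD url.toList i ' ' ≠ '.'))

-- ===== PRECONDITION & SPEC =====
def Spec_selectNonPeriods (url : String) (out : List Int) : Prop := out = selectNonPeriods_alt url
instance (url : String) (out : List Int) : Decidable (Spec_selectNonPeriods url out) := by unfold Spec_selectNonPeriods; infer_instance

-- ===== CLAIM (what is proved, stated in full; the proofs are below) =====
def Claim_equal_selectNonPeriods : Prop := ∀ (url : String), Dom_selectNonPeriods url → Spec_selectNonPeriods url (selectNonPeriods url)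

-- ===== LEMMAS AND PROOFS =====

-- A's loop body and B's rfind loop body, named for the lemmas
def stepA (s : List Int × List Int) (ic : Int × Char) : List Int × List Int :=
  if ic.2 ≠ '.' then (s.1, s.2 ++ [ic.1]) else (s.1 ++ s.2, ([] : List Int))

def stepR (acc : Int) (ic : Int × Char) : Int :=
  if ic.2 = '.' then ic.1 else acc

-- the common value: indices (offset k) of the non-'.' characters of pre
def canon (pre : List Char) (k : Int) : List Int :=
  ((PySem.List.enumerate pre k).filter (fun ic => decide (ic.2 ≠ '.'))).map (·.1)

theorem canon_cons (c : Char) (pre : List Char) (k : Int) :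
    canon (c :: pre) k = (if c = '.' then [] else [k]) ++ canon pre (k + 1) := by
  simp [canon, PySem.List.enumerate_cons]
  by_cases h : c = '.' <;> simp [h]

theorem A_nodot (suf : List Char) (h : '.' ∉ suf) :
    ∀ (k : Int) (v s : List Int),
      ((PySem.List.enumerate suf k).foldl stepA (v, s)).1 = v := by
  induction suf with
  | nil => intro k v s; simp [PySem.List.enumerate_nil]
  | cons c t ih =>
    intro k v s
    have hc : c ≠ '.' := fun hc => h (by simp [hc])
    have ht : '.' ∉ t := fun hm => h (by simp [hm])
    simp only [PySem.List.enumerate_cons, List.foldl_cons, stepA, if_pos hc]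
    exact ih ht (k + 1) v (s ++ [k])

theorem A_split (suf : List Char) (h : '.' ∉ suf) :
    ∀ (pre : List Char) (k : Int) (v s : List Int),
      ((PySem.List.enumerate (pre ++ '.' :: suf) k).foldl stepA (v, s)).1
        = v ++ s ++ canon pre k := by
  intro pre
  induction pre with
  | nil =>
    intro k v s
    simp only [List.nil_append, PySem.List.enumerate_cons, List.foldl_cons, stepA]
    simp only [ne_eq, not_true_eq_false, if_false]
    rw [A_nodot suf h]
    simp [canon]
  | cons c t ih =>
    intro k v s
    by_cases hc : c = '.'
    · simp only [List.cons_append, PySem.List.enumerate_cons, List.foldl_cons, stepA, hc,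
        ne_eq, not_true_eq_false, if_false]
      rw [ih (k + 1) (v ++ s) []]
      simp [canon_cons]
    · simp only [List.cons_append, PySem.List.enumerate_cons, List.foldl_cons, stepA, if_pos hc]
      rw [ih (k + 1) v (s ++ [k])]
      simp [canon_cons, hc]

theorem R_nodot (suf : List Char) (h : '.' ∉ suf) :
    ∀ (k a : Int), (PySem.List.enumerate suf k).foldl stepR a = a := by
  induction suf with
  | nil => intro k a; simp [PySem.List.enumerate_nil]
  | cons c t ih =>
    intro k a
    have hc : c ≠ '.' := fun hc => h (by simp [hc])
    have ht : '.' ∉ t := fun hm => h (by simp [hm])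
    simp only [PySem.List.enumerate_cons, List.foldl_cons, stepR, if_neg hc]
    exact ih ht (k + 1) a

theorem R_split (suf : List Char) (h : '.' ∉ suf) :
    ∀ (pre : List Char) (k a : Int),
      (PySem.List.enumerate (pre ++ '.' :: suf) k).foldl stepR a
        = k + pre.length := by
  intro pre
  induction pre with
  | nil =>
    intro k a
    simp only [List.nil_append, PySem.List.enumerate_cons, List.foldl_cons, stepR, if_true]
    rw [R_nodot suf h]
    simp
  | cons c t ih =>
    intro k a
    simp only [List.cons_append, PySem.List.enumerate_cons, List.foldl_cons]
    rw [ih (k + 1)]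
    simp only [List.length_cons]
    push_cast
    ring

-- B's range-filter over an abstract index getter equals canon
theorem B_filter (pre : List Char) :
    ∀ (k : Int) (g : Int → Char),
      (∀ j : Nat, (hj : j < pre.length) → g (k + j) = pre[j]) →
      (PySem.List.pyRange k (k + pre.length) 1).filter (fun i => decide (g i ≠ '.'))
        = canon pre k := by
  induction pre with
  | nil => intro k g _; simp [PySem.List.pyRange_one_eq_nil, canon]
  | cons c t ih =>
    intro k g hg
    have hk : k < k + (c :: t).length := by simp
    rw [PySem.List.pyRange_one_cons hk]
    have hkc : g k = c := by
      have := hg 0 (by simp)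
      simpa using this
    have hrec : (PySem.List.pyRange (k + 1) (k + 1 + t.length) 1).filter
        (fun i => decide (g i ≠ '.')) = canon t (k + 1) := by
      apply ih (k + 1) g
      intro j hj
      have := hg (j + 1) (by simpa using Nat.succ_lt_succ hj)
      simpa [add_assoc, add_comm, add_left_comm] using this
    have harith : k + ((c :: t).length : Int) = k + 1 + t.length := by
      push_cast [List.length_cons]; ring
    rw [harith, List.filter_cons, hrec, canon_cons]
    by_cases hc : c = '.'
    · simp [hkc, hc]
    · simp [hkc, hc]

-- indexing the full list inside pre equals indexing pre
theorem getD_append (pre rest : List Char) (j : Nat) (hj : j < pre.length) :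
    PySem.List.pyGetD (pre ++ rest) ((0 : Int) + j) ' ' = pre[j] := by
  have h0 : (0 : Int) + (j : Int) = (j : Int) := by ring
  rw [h0, PySem.List.pyGetD_natCast]
  rw [List.getD_eq_getElem?_getD, List.getElem?_append_left hj]
  simp [hj]

-- split a list containing '.' at its LAST '.'
theorem exists_last_dot (cs : List Char) (h : '.' ∈ cs) :
    ∃ pre suf, cs = pre ++ '.' :: suf ∧ '.' ∉ suf := by
  induction cs using List.reverseRecOn with
  | nil => simp at h
  | append_singleton xs x ih =>
    by_cases hx : x = '.'
    · exact ⟨xs, [], by simp [hx], by simp⟩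
    · have hxs : '.' ∈ xs := by
        rcases List.mem_append.mp h with h1 | h2
        · exact h1
        · simp at h2; exact absurd h2.symm hx
      obtain ⟨pre, suf, heq, hns⟩ := ih hxs
      exact ⟨pre, suf ++ [x], by simp [heq], by
        simp only [List.mem_append, List.mem_singleton]
        rintro (h1 | h2)
        · exact hns h1
        · exact hx h2.symm⟩

-- ===== VERDICT (by name: the statement is the Claim_ definition above) =====
theorem selectNonPeriods_spec : Claim_equal_selectNonPeriods := by
  intro url _
  simp only [Spec_selectNonPeriods, selectNonPeriods, selectNonPeriods_alt]
  by_cases h : '.' ∈ url.toList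
  · obtain ⟨pre, suf, heq, hns⟩ := exists_last_dot url.toList h
    rw [heq]
    rw [show (fun (s : List Int × List Int) (ic : Int × Char) =>
      if ic.2 ≠ '.' then (s.1, s.2 ++ [ic.1]) else (s.1 ++ s.2, ([] : List Int))) = stepA from rfl]
    rw [show (fun (acc : Int) (ic : Int × Char) =>
      if ic.2 = '.' then ic.1 else acc) = stepR from rfl]
    rw [A_split suf hns pre 0 [] [], R_split suf hns pre 0 (-1)]
    rw [B_filter pre 0 _ (fun j hj => getD_append pre ('.' :: suf) j hj)]
    simp
  · -- no '.' in url: A's valid stays [], B's rfind is -1 and range(-1) is empty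
    rw [show (fun (s : List Int × List Int) (ic : Int × Char) =>
      if ic.2 ≠ '.' then (s.1, s.2 ++ [ic.1]) else (s.1 ++ s.2, ([] : List Int))) = stepA from rfl]
    rw [show (fun (acc : Int) (ic : Int × Char) =>
      if ic.2 = '.' then ic.1 else acc) = stepR from rfl]
    rw [A_nodot url.toList h 0 [] [], R_nodot url.toList h 0 (-1)]
    rw [PySem.List.pyRange_one_eq_nil (by norm_num)]
    simp
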